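-- pv_equiv track=rewrite | github.com/taylormitchell/roam_orbit | roam/content.py | extract_page_ref_strings
-- ===== SOURCE A (Python) =====
-- def extract_page_ref_strings(string):
--     # https://stackoverflow.com/questions/524548/regular-expression-to-detect-semi-colon-terminated-c-for-while-loops/524624#524624
--     bracket_count = 0
--     pages = []
--     page = ""
--     prev_char = ""
--     for j,c in enumerate(string):
--         # Track page opening and closing
--         if prev_char+c == "[[":
--             if not page:
--                 page = string[j-1]
--             bracket_count += 1
--             prev_char = ""
--         elif prev_char+c == "]]":
--             bracket_count -= 1
--             prev_char = ""
--         else: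
--             prev_char = c
--         if page:
--             page += c
--         # End of page
--         if bracket_count == 0 and page:
--             pages.append(page)
--             page = ""
--
--     return pages
-- ===== SOURCE B (Python) =====
-- def extract_page_ref_strings(string):
--     # Index/slice scan: two-char lookahead, signed depth counter and a start
--     # index instead of accumulating the page character by character.
--     n = len(string)
--     i = 0
--     depth = 0
--     start = None
--     pages = []
--     while i < n:
--         pair = string[i:i + 2]
--         if pair == "[[":
--             if start is None:
--                 start = i
--             depth += 1
--             i += 2
--         elif pair == "]]":
--             depth -= 1
--             i += 2
--         else:
--             i += 1
--         if depth == 0 and start is not None: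
--             pages.append(string[start:i])
--             start = None
--     return pages
-- ===== Notes on version B (the rewrite author's own statement) =====
-- stated objective: alternative
-- what changed: Replaces A's char-by-char scan (prev_char pairing, growing the page string one character per iteration) with an index-based while loop using two-character lookahead that keeps only a signed depth counter and a start index and slices each bracketed page out of the input once.
import Mathlib
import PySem

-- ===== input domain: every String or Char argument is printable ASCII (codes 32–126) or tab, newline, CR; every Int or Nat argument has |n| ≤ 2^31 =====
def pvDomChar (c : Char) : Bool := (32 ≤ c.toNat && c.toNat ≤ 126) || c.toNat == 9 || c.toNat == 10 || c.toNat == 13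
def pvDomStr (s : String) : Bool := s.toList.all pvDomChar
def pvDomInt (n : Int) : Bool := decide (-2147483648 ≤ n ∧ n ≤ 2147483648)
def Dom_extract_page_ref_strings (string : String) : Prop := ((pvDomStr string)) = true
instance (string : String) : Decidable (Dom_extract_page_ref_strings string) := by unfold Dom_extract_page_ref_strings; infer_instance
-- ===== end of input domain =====

-- B replaces A's char-by-char accumulation (prev_char pairing + growing page string)
-- by an index scan with two-character lookahead, a signed depth counter and a start
-- index, slicing each page out once; same return value, different decomposition.

-- ===== PORT A =====
-- loop state: (bracket_count, pages, page, prev_char); Python strings page/prev kept as List Char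
def pvALoop (s : List Char) : List (Int × Char) → Int → List String → List Char → List Char → List String
  | [], _, pages, _, _ => pages
  | (j, c) :: rest, count, pages, page, prev =>
    let t :=
      if prev ++ [c] = ['[', '['] then
        -- page = string[j-1]: pyGet? is never none here (s is nonempty while iterating, j-1 ≥ -1)
        (count + 1, (if page = [] then ((PySem.List.pyGet? s (j - 1)).elim [] (fun x => [x])) else page), ([] : List Char))
      else if prev ++ [c] = [']', ']'] then
        (count - 1, page, ([] : List Char))
      else
        (count, page, [c])
    let page2 := if t.2.1 ≠ [] then t.2.1 ++ [c] else t.2.1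
    if t.1 = 0 ∧ page2 ≠ [] then
      pvALoop s rest t.1 (pages ++ [String.ofList page2]) [] t.2.2
    else
      pvALoop s rest t.1 pages page2 t.2.2

def extract_page_ref_strings (string : String) : List String :=
  pvALoop string.toList (PySem.List.enumerate string.toList) 0 [] [] []

-- ===== PORT B =====
-- loop state: (i, depth, start, pages); fuel = n bounds the ≤ n iterations of the while loop
def pvBLoop (s : List Char) (n : Nat) : Nat → Nat → Int → Option Nat → List String → List String
  | 0, _, _, _, pages => pages
  | fuel + 1, i, depth, start, pages =>
    if i < n then
      let pair := PySem.List.slice s (some (i : Int)) (some ((i : Int) + 2))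
      let t :=
        if pair = ['[', '['] then
          (depth + 1, (match start with | none => some i | some st => some st), i + 2)
        else if pair = [']', ']'] then
          (depth - 1, start, i + 2)
        else
          (depth, start, i + 1)
      match t.2.1 with
      | some st =>
        if t.1 = 0 then
          pvBLoop s n fuel t.2.2 t.1 none
            (pages ++ [String.ofList (PySem.List.slice s (some (st : Int)) (some (t.2.2 : Int)))])
        else
          pvBLoop s n fuel t.2.2 t.1 (some st) pages
      | none => pvBLoop s n fuel t.2.2 t.1 none pages
    else pages

def extract_page_ref_strings_alt (string : String) : List String :=
  pvBLoop string.toList string.toList.length string.toList.length 0 0 none []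

-- ===== PRECONDITION & SPEC =====
def Spec_extract_page_ref_strings (string : String) (out : List String) : Prop := out = extract_page_ref_strings_alt string
instance (string : String) (out : List String) : Decidable (Spec_extract_page_ref_strings string out) := by unfold Spec_extract_page_ref_strings; infer_instance

-- ===== CLAIM (what is proved, stated in full; the proofs are below) =====
def Claim_equal_extract_page_ref_strings : Prop := ∀ (string : String), Dom_extract_page_ref_strings string → Spec_extract_page_ref_strings string (extract_page_ref_strings string)

-- ===== LEMMAS AND PROOFS =====

-- the page A has accumulated is exactly the slice s[start:i]
def pvPageInv (s : List Char) (i : Nat) (d : Int) (start : Option Nat) (page : List Char) : Prop :=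
  match start with
  | none => page = []
  | some st => st < i ∧ page = (s.drop st).take (i - st) ∧ d ≠ 0

-- A's prev_char is empty or the previous character, which then forms no token with s[i]
def pvPrevInv (s : List Char) (i : Nat) (prev : List Char) : Prop :=
  prev = [] ∨
    (∃ h : 0 < i ∧ i ≤ s.length, prev = [s[i - 1]'(by omega)] ∧
      (∀ h2 : i < s.length,
        ¬(s[i - 1]'(by omega) = '[' ∧ s[i]'h2 = '[') ∧
        ¬(s[i - 1]'(by omega) = ']' ∧ s[i]'h2 = ']')))

lemma pv_take_snoc (s : List Char) (st k : Nat) (h : st + k < s.length) :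
    (s.drop st).take k ++ [s[st + k]] = (s.drop st).take (k + 1) := by
  rw [List.take_add_one]
  congr 1
  rw [List.getElem?_drop]
  simp [List.getElem?_eq_getElem (by omega : st + k < s.length)]


lemma pv_main (s : List Char) : ∀ (fuel i : Nat) (d : Int) (start : Option Nat)
    (pages : List String) (page prev : List Char),
    i ≤ s.length → s.length - i ≤ fuel →
    pvPageInv s i d start page → pvPrevInv s i prev →
    pvALoop s (PySem.List.enumerate (s.drop i) i) d pages page prev
      = pvBLoop s s.length fuel i d start pages := by
  intro fuel
  induction fuel with
  | zero =>
    intro i d start pages page prev hi hf hpage hprev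
    have hie : i = s.length := by omega
    subst hie
    simp [List.drop_length, pvALoop, pvBLoop]
  | succ fuel ih =>
    intro i d start pages page prev hi hf hpage hprev
    by_cases hin : i < s.length
    case neg =>
      have hie : i = s.length := by omega
      subst hie
      simp [List.drop_length, pvALoop, pvBLoop]
    case pos =>
    have hdrop : s.drop i = s[i] :: s.drop (i + 1) := List.drop_eq_getElem_cons hin
    -- A's step at index i always takes the else branch
    have hne1 : prev ++ [s[i]] ≠ ['[', '['] := by
      rcases hprev with hp | ⟨⟨hp1, hp2⟩, hpeq, hcond⟩
      · simp [hp]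
      · rw [hpeq]; intro hc
        have h1 := List.cons.injEq .. ▸ hc
        simp at h1
        exact ((hcond hin).1 ⟨h1.1, h1.2⟩)
    have hne2 : prev ++ [s[i]] ≠ [']', ']'] := by
      rcases hprev with hp | ⟨⟨hp1, hp2⟩, hpeq, hcond⟩
      · simp [hp]
      · rw [hpeq]; intro hc
        simp at hc
        exact ((hcond hin).2 ⟨hc.1, hc.2⟩)
    have hpair : PySem.List.slice s (some (i : Int)) (some ((i : Int) + 2)) = (s.drop i).take 2 := by
      have h2 : ((i : Int) + 2) = ((i + 2 : Nat) : Int) := by push_cast; ring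
      rw [h2, PySem.List.slice_natCast]; simp
    have hcast1 : ((i : Int) + 1) = ((i + 1 : Nat) : Int) := by push_cast; ring
    by_cases h1 : i + 1 < s.length
    case neg =>
      -- last character: B's lookahead pair is the singleton [s[i]], no token
      have hd1 : s.drop (i + 1) = [] := List.drop_eq_nil_of_le (by omega)
      have hpair1 : (s.drop i).take 2 = [s[i]] := by rw [hdrop, hd1]; rfl
      have hbne1 : ([s[i]] : List Char) ≠ ['[', '['] := by simp
      have hbne2 : ([s[i]] : List Char) ≠ [']', ']'] := by simp
      have hprev' : pvPrevInv s (i + 1) [s[i]] := by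
        refine Or.inr ⟨⟨by omega, by omega⟩, by simp, ?_⟩
        intro h2; omega
      rw [hdrop, PySem.List.enumerate_cons]
      cases start with
      | none =>
        have hpg : page = [] := hpage
        subst hpg
        simp only [pvALoop]
        rw [if_neg hne1, if_neg hne2]
        simp only [ne_eq, not_true_eq_false, and_false, if_false]
        rw [hcast1, ih (i + 1) d none pages [] [s[i]] (by omega) (by omega)
          (by simp [pvPageInv]) hprev']
        conv_rhs => rw [pvBLoop]
        simp [hin, hpair, hpair1, hbne1, hbne2]
      | some st =>
        obtain ⟨hst, hpeq, hd0⟩ := hpage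
        have hpne : page ≠ [] := by
          rw [hpeq]; apply List.ne_nil_of_length_pos; simp; omega
        have hp2 : page ++ [s[i]] = (s.drop st).take (i + 1 - st) := by
          have h := pv_take_snoc s st (i - st) (by omega)
          simp only [show st + (i - st) = i from by omega] at h
          rw [hpeq, h]; congr 1; omega
        simp only [pvALoop]
        rw [if_neg hne1, if_neg hne2]
        simp only [ne_eq, hpne, not_false_eq_true, if_pos, hd0, false_and, if_false, ]
        rw [hcast1, ih (i + 1) d (some st) pages (page ++ [s[i]]) [s[i]] (by omega) (by omega)
          ⟨by omega, hp2, hd0⟩ hprev']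
        conv_rhs => rw [pvBLoop]
        simp [hin, hpair, hpair1, hbne1, hbne2, hd0]
    case pos =>
    have hdrop1 : s.drop (i + 1) = s[i + 1] :: s.drop (i + 2) := List.drop_eq_getElem_cons h1
    have hpair2 : (s.drop i).take 2 = [s[i], s[i + 1]] := by rw [hdrop, hdrop1]; rfl
    have hcast2 : ((i : Int) + 1 + 1) = ((i + 2 : Nat) : Int) := by push_cast; ring
    by_cases hLL : s[i] = '[' ∧ s[i + 1] = '['
    case pos =>
      have hget : PySem.List.pyGet? s ((i : Int)) = some s[i] := by
        simp [PySem.List.pyGet?_natCast, List.getElem?_eq_getElem hin]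
      have hsl2 : PySem.List.slice s (some ((i : Int))) (some (((i + 2 : Nat)) : Int))
          = (s.drop i).take 2 := by rw [PySem.List.slice_natCast]; congr 1; omega
      rw [hdrop, PySem.List.enumerate_cons]
      cases start with
      | none =>
        have hpg : page = [] := hpage
        subst hpg
        simp only [pvALoop]
        rw [if_neg hne1, if_neg hne2]
        simp only [ne_eq, not_true_eq_false, and_false, if_false]
        rw [hdrop1, PySem.List.enumerate_cons]
        by_cases hd1 : d + 1 = 0
        · simp [pvALoop, hLL.1, hLL.2, hget, hd1]
          rw [hcast2, ih (i + 2) 0 none _ [] [] (by omega) (by omega)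
            (by simp [pvPageInv]) (Or.inl rfl)]
          conv_rhs => rw [pvBLoop]
          simp [hin, hpair, hpair2, hLL.1, hLL.2, hd1, ]
        · have hp3 : ([s[i], s[i + 1]] : List Char) = (s.drop i).take ((i + 2) - i) := by
            rw [show i + 2 - i = 2 from by omega, hpair2]
          rw [hLL.1, hLL.2] at hp3
          simp [pvALoop, hLL.1, hLL.2, hget, hd1]
          rw [hcast2, ih (i + 2) (d + 1) (some i) pages (['[', '[']) [] (by omega) (by omega)
            ⟨by omega, hp3, hd1⟩ (Or.inl rfl)]
          conv_rhs => rw [pvBLoop]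
          simp [hin, hpair, hpair2, hLL.1, hLL.2, hd1]
      | some st =>
        obtain ⟨hst, hpeq, hd0⟩ := hpage
        have hpne : page ≠ [] := by
          rw [hpeq]; apply List.ne_nil_of_length_pos; simp; omega
        have hp2 : page ++ [s[i]] = (s.drop st).take (i + 1 - st) := by
          have h := pv_take_snoc s st (i - st) (by omega)
          simp only [show st + (i - st) = i from by omega] at h
          rw [hpeq, h]; congr 1; omega
        have hp3 : page ++ [s[i], s[i + 1]] = (s.drop st).take (i + 2 - st) := by
          have h := pv_take_snoc s st (i + 1 - st) (by omega)
          simp only [show st + (i + 1 - st) = i + 1 from by omega] at h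
          rw [show (page ++ [s[i], s[i + 1]]) = (page ++ [s[i]]) ++ [s[i + 1]] from by simp,
            hp2, h]
          congr 1; omega
        rw [hLL.1, hLL.2] at hp3
        have hsl3 : PySem.List.slice s (some ((st : Int))) (some ((i : Int) + 2))
            = (s.drop st).take (i + 2 - st) := by
          rw [show ((i : Int) + 2) = ((i + 2 : Nat) : Int) from by push_cast; ring,
            PySem.List.slice_natCast]
        simp only [pvALoop]
        rw [if_neg hne1, if_neg hne2]
        simp only [ne_eq, hpne, not_false_eq_true, if_pos, hd0, false_and, if_false, ]
        rw [hdrop1, PySem.List.enumerate_cons]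
        by_cases hd1 : d + 1 = 0
        · simp [pvALoop, hLL.1, hLL.2, hd1, hpne]
          have hp3' : String.ofList page ++ "[[" = String.ofList ((s.drop st).take (i + 2 - st)) := by
            rw [← hp3]; simp
          rw [hp3']
          rw [hcast2, ih (i + 2) 0 none _ [] [] (by omega) (by omega)
            (by simp [pvPageInv]) (Or.inl rfl)]
          conv_rhs => rw [pvBLoop]
          simp [hin, hpair, hpair2, hLL.1, hLL.2, hd1, hsl3]
        · simp [pvALoop, hLL.1, hLL.2, hd1, hpne]
          rw [hcast2, ih (i + 2) (d + 1) (some st) pages (page ++ ['[', '[']) [] (by omega)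
            (by omega) ⟨by omega, hp3, hd1⟩ (Or.inl rfl)]
          conv_rhs => rw [pvBLoop]
          simp [hin, hpair, hpair2, hLL.1, hLL.2, hd1]
    case neg =>
    by_cases hRR : s[i] = ']' ∧ s[i + 1] = ']'
    case pos =>
      have hbne1 : ([s[i], s[i + 1]] : List Char) ≠ ['[', '['] := by
        intro hc; simp at hc; exact hLL ⟨hc.1, hc.2⟩
      rw [hdrop, PySem.List.enumerate_cons]
      cases start with
      | none =>
        have hpg : page = [] := hpage
        subst hpg
        simp only [pvALoop]
        rw [if_neg hne1, if_neg hne2]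
        simp only [ne_eq, not_true_eq_false, and_false, if_false]
        rw [hdrop1, PySem.List.enumerate_cons]
        simp [pvALoop, hRR.1, hRR.2]
        rw [hcast2, ih (i + 2) (d - 1) none pages [] [] (by omega) (by omega)
          (by simp [pvPageInv]) (Or.inl rfl)]
        conv_rhs => rw [pvBLoop]
        simp [hin, hpair, hpair2, hRR.1, hRR.2]
      | some st =>
        obtain ⟨hst, hpeq, hd0⟩ := hpage
        have hpne : page ≠ [] := by
          rw [hpeq]; apply List.ne_nil_of_length_pos; simp; omega
        have hp2 : page ++ [s[i]] = (s.drop st).take (i + 1 - st) := by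
          have h := pv_take_snoc s st (i - st) (by omega)
          simp only [show st + (i - st) = i from by omega] at h
          rw [hpeq, h]; congr 1; omega
        have hp3 : page ++ [s[i], s[i + 1]] = (s.drop st).take (i + 2 - st) := by
          have h := pv_take_snoc s st (i + 1 - st) (by omega)
          simp only [show st + (i + 1 - st) = i + 1 from by omega] at h
          rw [show (page ++ [s[i], s[i + 1]]) = (page ++ [s[i]]) ++ [s[i + 1]] from by simp,
            hp2, h]
          congr 1; omega
        rw [hRR.1, hRR.2] at hp3
        have hsl3 : PySem.List.slice s (some ((st : Int))) (some ((i : Int) + 2))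
            = (s.drop st).take (i + 2 - st) := by
          rw [show ((i : Int) + 2) = ((i + 2 : Nat) : Int) from by push_cast; ring,
            PySem.List.slice_natCast]
        simp only [pvALoop]
        rw [if_neg hne1, if_neg hne2]
        simp only [ne_eq, hpne, not_false_eq_true, if_pos, hd0, false_and, if_false, ]
        rw [hdrop1, PySem.List.enumerate_cons]
        by_cases hd1 : d - 1 = 0
        · simp [pvALoop, hRR.1, hRR.2, hd1, hpne]
          have hp3' : String.ofList page ++ "]]" = String.ofList ((s.drop st).take (i + 2 - st)) := by
            rw [← hp3]; simp
          rw [hp3']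
          rw [hcast2, ih (i + 2) 0 none _ [] [] (by omega) (by omega)
            (by simp [pvPageInv]) (Or.inl rfl)]
          conv_rhs => rw [pvBLoop]
          simp [hin, hpair, hpair2, hRR.1, hRR.2, hd1, hsl3]
        · simp [pvALoop, hRR.1, hRR.2, hd1, hpne]
          rw [hcast2, ih (i + 2) (d - 1) (some st) pages (page ++ [']', ']']) [] (by omega)
            (by omega) ⟨by omega, hp3, hd1⟩ (Or.inl rfl)]
          conv_rhs => rw [pvBLoop]
          simp [hin, hpair, hpair2, hRR.1, hRR.2, hd1]
    case neg =>
      have hbne1 : ([s[i], s[i + 1]] : List Char) ≠ ['[', '['] := by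
        intro hc; simp at hc; exact hLL ⟨hc.1, hc.2⟩
      have hbne2 : ([s[i], s[i + 1]] : List Char) ≠ [']', ']'] := by
        intro hc; simp at hc; exact hRR ⟨hc.1, hc.2⟩
      have hprev' : pvPrevInv s (i + 1) [s[i]] := by
        refine Or.inr ⟨⟨by omega, by omega⟩, by simp, ?_⟩
        intro h2
        exact ⟨fun hc => hLL ⟨hc.1, hc.2⟩, fun hc => hRR ⟨hc.1, hc.2⟩⟩
      rw [hdrop, PySem.List.enumerate_cons]
      cases start with
      | none =>
        have hpg : page = [] := hpage
        subst hpg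
        simp only [pvALoop]
        rw [if_neg hne1, if_neg hne2]
        simp only [ne_eq, not_true_eq_false, and_false, if_false]
        rw [hcast1, ih (i + 1) d none pages [] [s[i]] (by omega) (by omega)
          (by simp [pvPageInv]) hprev']
        conv_rhs => rw [pvBLoop]
        simp [hin, hpair, hpair2, hbne1, hbne2]
      | some st =>
        obtain ⟨hst, hpeq, hd0⟩ := hpage
        have hpne : page ≠ [] := by
          rw [hpeq]; apply List.ne_nil_of_length_pos; simp; omega
        have hp2 : page ++ [s[i]] = (s.drop st).take (i + 1 - st) := by
          have h := pv_take_snoc s st (i - st) (by omega)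
          simp only [show st + (i - st) = i from by omega] at h
          rw [hpeq, h]; congr 1; omega
        simp only [pvALoop]
        rw [if_neg hne1, if_neg hne2]
        simp only [ne_eq, hpne, not_false_eq_true, if_pos, hd0, false_and, if_false, ]
        rw [hcast1, ih (i + 1) d (some st) pages (page ++ [s[i]]) [s[i]] (by omega) (by omega)
          ⟨by omega, hp2, hd0⟩ hprev']
        conv_rhs => rw [pvBLoop]
        simp [hin, hpair, hpair2, hbne1, hbne2, hd0]

-- ===== VERDICT (by name: the statement is the Claim_ definition above) =====
theorem extract_page_ref_strings_spec : Claim_equal_extract_page_ref_strings := by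
  intro string _
  unfold Spec_extract_page_ref_strings extract_page_ref_strings extract_page_ref_strings_alt
  have h := pv_main string.toList string.toList.length 0 0 none [] [] []
    (by omega) (by omega) (by simp [pvPageInv]) (Or.inl rfl)
  simpa using h
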